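-- pv_equiv track=rewrite | github.com/Maximus690/CS110 | Documents/Pycharm/CS110/Projects/project5/decode.py | decode_function
-- ===== SOURCE A (Python) =====
-- def decode_function(need_decode: list[str], key_dict) -> list[str]:
--     decoded_lst = []
--     for line in need_decode:
--         decoded_line = ""
--         for c in line:
--             new_c = key_dict.get(c.lower(), c)
--             if c.isupper():
--                 decoded_line += new_c.upper()
--             else:
--                 decoded_line += new_c
--         decoded_lst.append(decoded_line)
--     return decoded_lst
-- ===== SOURCE B (Python) =====
-- def decode_function(need_decode: list[str], key_dict) -> list[str]:
--     # Build a translation table once (both cases per key), then use str.translate per line.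
--     table = {}
--     for k, v in key_dict.items():
--         if len(k) == 1 and k == k.lower():
--             table.setdefault(ord(k), v)
--             table.setdefault(ord(k.upper()), v.upper())
--     return [line.translate(table) for line in need_decode]
-- ===== Notes on version B (the rewrite author's own statement) =====
-- stated objective: idiomatic
-- what changed: B precomputes a translation table once from key_dict (adding both the lower- and upper-case entry per live key) and then maps str.translate over the lines, replacing A's per-character dict.get + isupper branch and string concatenation.
import Mathlib
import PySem

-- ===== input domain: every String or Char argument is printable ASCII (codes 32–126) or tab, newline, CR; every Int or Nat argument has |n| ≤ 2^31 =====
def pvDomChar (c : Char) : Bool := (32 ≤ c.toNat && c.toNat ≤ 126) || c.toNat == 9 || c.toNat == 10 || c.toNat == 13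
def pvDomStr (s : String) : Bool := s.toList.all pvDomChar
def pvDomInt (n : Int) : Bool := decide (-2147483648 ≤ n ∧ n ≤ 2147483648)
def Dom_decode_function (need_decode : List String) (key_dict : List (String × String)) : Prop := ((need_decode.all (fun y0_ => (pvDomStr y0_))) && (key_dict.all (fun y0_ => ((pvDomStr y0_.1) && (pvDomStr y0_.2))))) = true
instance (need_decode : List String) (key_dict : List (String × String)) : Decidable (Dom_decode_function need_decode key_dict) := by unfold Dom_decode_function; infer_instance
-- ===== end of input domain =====

-- B builds a translation table once from key_dict and maps str.translate over the lines
-- (objective: idiomatic); return values proved equal, neither program mutates its arguments.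

-- ===== PORT A =====
def decode_function (need_decode : List String) (key_dict : List (String × String)) : List String :=
  need_decode.foldl (fun decoded_lst line =>
    decoded_lst ++ [String.ofList (line.toList.foldl (fun decoded_line c =>
      let new_c := (PySem.Dict.ofList key_dict).getD (String.ofList (PySem.Chars.lower [c])) (String.ofList [c])
      if PySem.Chars.isupper c then decoded_line ++ (PySem.Str.upper new_c).toList
      else decoded_line ++ new_c.toList) [])]) []

-- ===== PORT B =====
-- table.setdefault(ord(k), v); table.setdefault(ord(k.upper()), v.upper())  (guarded by len(k)==1 and k==k.lower())
def pvAddEntry (table : PySem.Dict Int String) (p : String × String) : PySem.Dict Int String :=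
  match p.1.toList with
  | [k] =>
    if PySem.Chars.lower [k] == [k] then
      (table.setdefault ((k.toNat : Int)) p.2).setdefault (((PySem.Chars.upperChar k).toNat : Int)) (PySem.Str.upper p.2)
    else table
  | _ => table

-- line.translate(table): each char is replaced by table[ord(c)] when present, kept otherwise
def pvTranslate (table : PySem.Dict Int String) (line : String) : String :=
  String.ofList (line.toList.foldl (fun acc c =>
    acc ++ (match table.get? ((c.toNat : Int)) with | some v => v.toList | none => [c])) [])

def decode_function_alt (need_decode : List String) (key_dict : List (String × String)) : List String :=
  let table := (PySem.Dict.ofList key_dict).items.foldl pvAddEntry PySem.Dict.empty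
  need_decode.map (pvTranslate table)

-- ===== PRECONDITION & SPEC =====
def Spec_decode_function (need_decode : List String) (key_dict : List (String × String)) (out : List String) : Prop := out = decode_function_alt need_decode key_dict
instance (need_decode : List String) (key_dict : List (String × String)) (out : List String) : Decidable (Spec_decode_function need_decode key_dict out) := by unfold Spec_decode_function; infer_instance

-- ===== CLAIM (what is proved, stated in full; the proofs are below) =====
def Claim_equal_decode_function : Prop := ∀ (need_decode : List String) (key_dict : List (String × String)), Dom_decode_function need_decode key_dict → Spec_decode_function need_decode key_dict (decode_function need_decode key_dict)

-- ===== LEMMAS AND PROOFS =====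

-- first hit of n among the table entries the items list contributes, in contribution order
def pvLook (ps : List (String × String)) (n : Int) : Option String :=
  match ps with
  | [] => none
  | (k, v) :: rest =>
    match k.toList with
    | [d] =>
      if PySem.Chars.lower [d] == [d] then
        (if ((d.toNat : Int) = n) then some v
         else if (((PySem.Chars.upperChar d).toNat : Int) = n) then some (PySem.Str.upper v)
         else pvLook rest n)
      else pvLook rest n
    | _ => pvLook rest n

theorem pv_foldl_get? (ps : List (String × String)) (t : PySem.Dict Int String) (n : Int) :
    (ps.foldl pvAddEntry t).get? n = (t.get? n).or (pvLook ps n) := by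
  induction ps generalizing t with
  | nil => simp [pvLook]
  | cons p rest ih =>
    obtain ⟨k, v⟩ := p
    rw [List.foldl_cons, ih]
    rcases hl : k.toList with _ | ⟨d, _ | ⟨e, tl⟩⟩ <;>
      simp only [pvAddEntry, pvLook, hl]
    · by_cases hf : (PySem.Chars.lower [d] == [d]) = true
      · rw [if_pos hf, if_pos hf]
        by_cases h2 : (((PySem.Chars.upperChar d).toNat : Int) = n)
        · subst h2
          rw [PySem.Dict.get?_setdefault_self]
          by_cases h1 : ((d.toNat : Int) = ((PySem.Chars.upperChar d).toNat : Int))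
          · rw [if_pos h1, h1, PySem.Dict.get?_setdefault_self]
            cases t.get? ((PySem.Chars.upperChar d).toNat : Int) <;> simp
          · rw [if_neg h1, PySem.Dict.get?_setdefault_of_ne _ _ (Ne.symm h1), if_pos rfl]
            cases t.get? ((PySem.Chars.upperChar d).toNat : Int) <;> simp
        · rw [PySem.Dict.get?_setdefault_of_ne _ _ (Ne.symm h2)]
          by_cases h1 : ((d.toNat : Int) = n)
          · subst h1
            rw [PySem.Dict.get?_setdefault_self, if_pos rfl]
            cases t.get? ((d.toNat : Int)) <;> simp
          · rw [PySem.Dict.get?_setdefault_of_ne _ _ (Ne.symm h1), if_neg h1, if_neg h2]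
      · rw [if_neg hf, if_neg hf]

-- ASCII case facts used by the per-character analysis
theorem pv_toNat_inj {a b : Char} (h : a.toNat = b.toNat) : a = b :=
  Char.ext (UInt32.toNat_inj.mp h)

theorem pv_isupper_iff (c : Char) : PySem.Chars.isupper c = true ↔ 65 ≤ c.toNat ∧ c.toNat ≤ 90 := by
  rw [PySem.Chars.isupper, Bool.and_eq_true, decide_eq_true_iff, decide_eq_true_iff,
    Char.le_def, Char.le_def, UInt32.le_iff_toNat_le, UInt32.le_iff_toNat_le]
  exact Iff.rfl

theorem pv_islower_iff (c : Char) : PySem.Chars.islower c = true ↔ 97 ≤ c.toNat ∧ c.toNat ≤ 122 := by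
  rw [PySem.Chars.islower, Bool.and_eq_true, decide_eq_true_iff, decide_eq_true_iff,
    Char.le_def, Char.le_def, UInt32.le_iff_toNat_le, UInt32.le_iff_toNat_le]
  exact Iff.rfl

theorem pv_lowerChar_toNat {c : Char} (h : PySem.Chars.isupper c = true) :
    (PySem.Chars.lowerChar c).toNat = c.toNat + 32 := by
  have hb := (pv_isupper_iff c).mp h
  rw [PySem.Chars.lowerChar, if_pos h, Char.toNat_ofNat, if_pos (Or.inl (by omega))]

theorem pv_lowerChar_of_not {c : Char} (h : PySem.Chars.isupper c = false) :
    PySem.Chars.lowerChar c = c := by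
  rw [PySem.Chars.lowerChar, if_neg (by simp [h])]

theorem pv_upperChar_toNat {c : Char} (h : PySem.Chars.islower c = true) :
    (PySem.Chars.upperChar c).toNat = c.toNat - 32 := by
  have hb := (pv_islower_iff c).mp h
  rw [PySem.Chars.upperChar, if_pos h, Char.toNat_ofNat, if_pos (Or.inl (by omega))]

theorem pv_upperChar_of_not {c : Char} (h : PySem.Chars.islower c = false) :
    PySem.Chars.upperChar c = c := by
  rw [PySem.Chars.upperChar, if_neg (by simp [h])]

theorem pv_not_islower_of_isupper {c : Char} (h : PySem.Chars.isupper c = true) :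
    PySem.Chars.islower c = false := by
  have hb := (pv_isupper_iff c).mp h
  rcases hlo : PySem.Chars.islower c with _ | _
  · rfl
  · have := (pv_islower_iff c).mp hlo; omega

theorem pv_upperChar_isupper {c : Char} (h : PySem.Chars.islower c = true) :
    PySem.Chars.isupper (PySem.Chars.upperChar c) = true := by
  have hb := (pv_islower_iff c).mp h
  rw [pv_isupper_iff, pv_upperChar_toNat h]
  omega

theorem pv_lowerChar_islower {c : Char} (h : PySem.Chars.isupper c = true) :
    PySem.Chars.islower (PySem.Chars.lowerChar c) = true := by
  have hb := (pv_isupper_iff c).mp h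
  rw [pv_islower_iff, pv_lowerChar_toNat h]
  omega

theorem pv_lowerChar_not_isupper (c : Char) :
    PySem.Chars.isupper (PySem.Chars.lowerChar c) = false := by
  rcases hu : PySem.Chars.isupper c with _ | _
  · rw [pv_lowerChar_of_not hu]; exact hu
  · rcases hv : PySem.Chars.isupper (PySem.Chars.lowerChar c) with _ | _
    · rfl
    · have h1 := (pv_isupper_iff c).mp hu
      have h2 := (pv_isupper_iff _).mp hv
      rw [pv_lowerChar_toNat hu] at h2
      omega

theorem pv_lower_single_fix_iff (d : Char) :
    (PySem.Chars.lower [d] == [d]) = true ↔ PySem.Chars.isupper d = false := by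
  constructor
  · intro h
    rcases hu : PySem.Chars.isupper d with _ | _
    · rfl
    · exfalso
      have : PySem.Chars.lowerChar d = d := by simpa [PySem.Chars.lower] using h
      have := congrArg Char.toNat this
      rw [pv_lowerChar_toNat hu] at this
      omega
  · intro h
    simp [PySem.Chars.lower, pv_lowerChar_of_not h]

theorem pv_char_eq (ps : List (String × String)) (c : Char) :
    (match pvLook ps ((c.toNat : Int)) with | some v => v.toList | none => [c])
      = (if PySem.Chars.isupper c then
           (PySem.Str.upper (((ps.find? (fun p => p.1 == String.ofList (PySem.Chars.lower [c]))).map Prod.snd).getD (String.ofList [c]))).toList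
         else (((ps.find? (fun p => p.1 == String.ofList (PySem.Chars.lower [c]))).map Prod.snd).getD (String.ofList [c])).toList) := by
  induction ps with
  | nil =>
    rcases hu : PySem.Chars.isupper c with _ | _
    · simp [pvLook]
    · simp [pvLook, PySem.Str.upper, PySem.Chars.upper,
        pv_upperChar_of_not (pv_not_islower_of_isupper hu)]
  | cons p rest ih =>
    obtain ⟨k, v⟩ := p
    rcases hl : k.toList with _ | ⟨d, _ | ⟨e, tl⟩⟩
    · have hk : (k == String.ofList (PySem.Chars.lower [c])) = false := by
        rw [beq_eq_false_iff_ne]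
        intro h
        have := congrArg String.toList h
        simp [hl, PySem.Chars.lower] at this
      rw [List.find?_cons_of_neg (by simp [hk])]
      simpa [pvLook, hl] using ih
    · by_cases hf : (PySem.Chars.lower [d] == [d]) = true
      · have hdu : PySem.Chars.isupper d = false := (pv_lower_single_fix_iff d).mp hf
        rcases hu : PySem.Chars.isupper c with _ | _
        · -- c is not an uppercase letter: only the direct entry can fire
          have hlc : PySem.Chars.lower [c] = [c] := by
            simp [PySem.Chars.lower, pv_lowerChar_of_not hu]
          by_cases h2 : d = c
          · have hl' : k.toList = [c] := by rw [hl, h2]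
            have hk : (k == String.ofList (PySem.Chars.lower [c])) = true := by
              rw [beq_iff_eq, hlc, ← hl']
              simp
            rw [List.find?_cons_of_pos (by simpa using hk)]
            simp [pvLook, hl, h2, hlc]
          · have hk : (k == String.ofList (PySem.Chars.lower [c])) = false := by
              rw [beq_eq_false_iff_ne]
              intro h
              have := congrArg String.toList h
              rw [hlc] at this
              simp [hl] at this
              exact h2 this
            rw [List.find?_cons_of_neg (by simp [hk])]
            have hn1 : ¬ ((d.toNat : Int) = (c.toNat : Int)) := by
              intro h
              exact h2 (pv_toNat_inj (by omega))
            have hn2 : ¬ (((PySem.Chars.upperChar d).toNat : Int) = (c.toNat : Int)) := by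
              intro h
              have heq : PySem.Chars.upperChar d = c := pv_toNat_inj (by omega)
              rcases hld : PySem.Chars.islower d with _ | _
              · rw [pv_upperChar_of_not hld] at heq
                exact h2 heq
              · have := pv_upperChar_isupper hld
                rw [heq, hu] at this
                exact Bool.false_ne_true this
            simpa [pvLook, hl, hf, hn1, hn2, hu] using ih
        · -- c is an uppercase letter: only the derived upper entry can fire
          have hlc : PySem.Chars.lower [c] = [PySem.Chars.lowerChar c] := rfl
          have hcb := (pv_isupper_iff c).mp hu
          have hn1 : ¬ ((d.toNat : Int) = (c.toNat : Int)) := by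
            intro h
            have hdc : d = c := pv_toNat_inj (by omega)
            rw [hdc] at hdu
            simp [hu] at hdu
          by_cases h2 : d = PySem.Chars.lowerChar c
          · have hld : PySem.Chars.islower d = true := h2 ▸ pv_lowerChar_islower hu
            have hn2 : ((PySem.Chars.upperChar d).toNat : Int) = (c.toNat : Int) := by
              have hb := (pv_islower_iff d).mp hld
              have h3 := pv_upperChar_toNat hld
              have h4 : d.toNat = c.toNat + 32 := by
                rw [h2, pv_lowerChar_toNat hu]
              omega
            have hk : (k == String.ofList (PySem.Chars.lower [c])) = true := by
              rw [beq_iff_eq, hlc]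
              have : k.toList = [PySem.Chars.lowerChar c] := by rw [hl, h2]
              exact (by rw [← this]; simp)
            rw [List.find?_cons_of_pos (by simpa using hk)]
            simp [pvLook, hl, hf, hn1, hn2]
          · have hn2 : ¬ (((PySem.Chars.upperChar d).toNat : Int) = (c.toNat : Int)) := by
              intro h
              rcases hld : PySem.Chars.islower d with _ | _
              · rw [pv_upperChar_of_not hld] at h
                exact hn1 h
              · have hb := (pv_islower_iff d).mp hld
                have h3 : d.toNat = c.toNat + 32 := by
                  have := pv_upperChar_toNat hld
                  omega
                apply h2
                apply pv_toNat_inj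
                rw [pv_lowerChar_toNat hu, h3]
            have hk : (k == String.ofList (PySem.Chars.lower [c])) = false := by
              rw [beq_eq_false_iff_ne]
              intro h
              have := congrArg String.toList h
              rw [hlc] at this
              simp [hl] at this
              exact h2 this
            rw [List.find?_cons_of_neg (by simp [hk])]
            simpa [pvLook, hl, hf, hn1, hn2, hu] using ih
      · -- dead key: d is uppercase, and the looked-up key is never uppercase
        have hdu : PySem.Chars.isupper d = true := by
          rcases h : PySem.Chars.isupper d with _ | _
          · exact absurd ((pv_lower_single_fix_iff d).mpr h) hf
          · rfl
        have hk : (k == String.ofList (PySem.Chars.lower [c])) = false := by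
          rw [beq_eq_false_iff_ne]
          intro h
          have h' := congrArg String.toList h
          have hlc : PySem.Chars.lower [c] = [PySem.Chars.lowerChar c] := rfl
          rw [hlc] at h'
          simp [hl] at h'
          rw [h'] at hdu
          rw [pv_lowerChar_not_isupper c] at hdu
          exact Bool.false_ne_true hdu
        rw [List.find?_cons_of_neg (by simp [hk])]
        simpa [pvLook, hl, hf] using ih
    · have hk : (k == String.ofList (PySem.Chars.lower [c])) = false := by
        rw [beq_eq_false_iff_ne]
        intro h
        have := congrArg String.toList h
        simp [hl, PySem.Chars.lower] at this
      rw [List.find?_cons_of_neg (by simp [hk])]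
      simpa [pvLook, hl] using ih

-- ===== VERDICT (by name: the statement is the Claim_ definition above) =====
theorem decode_function_spec : Claim_equal_decode_function := by
  intro need_decode key_dict _
  unfold Spec_decode_function decode_function decode_function_alt
  rw [PySem.List.foldl_append_singleton_eq_map]
  show _ = List.map _ _
  refine congrArg (fun f => List.map f need_decode) (funext fun line => ?_)
  unfold pvTranslate
  refine congrArg String.ofList ?_
  have hstep : (fun (decoded_line : List Char) (c : Char) =>
      let new_c := (PySem.Dict.ofList key_dict).getD (String.ofList (PySem.Chars.lower [c])) (String.ofList [c])
      if PySem.Chars.isupper c then decoded_line ++ (PySem.Str.upper new_c).toList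
      else decoded_line ++ new_c.toList)
      = (fun (acc : List Char) (c : Char) => acc ++
          (match ((PySem.Dict.ofList key_dict).items.foldl pvAddEntry PySem.Dict.empty).get? ((c.toNat : Int)) with
           | some v => v.toList | none => [c])) := by
    funext dl c
    have ht : ((PySem.Dict.ofList key_dict).items.foldl pvAddEntry PySem.Dict.empty).get? ((c.toNat : Int))
        = pvLook (PySem.Dict.ofList key_dict).items ((c.toNat : Int)) := by
      rw [pv_foldl_get?]
      simp [PySem.Dict.empty, PySem.Dict.get?]
    rw [ht, pv_char_eq]
    simp only [PySem.Dict.getD, PySem.Dict.get?]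
    cases hu : PySem.Chars.isupper c <;> simp
  rw [hstep]
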